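-- pv_equiv track=rewrite | github.com/sagar189202115/python_practice | leetcode/2094. Finding 3-Digit Even Numbers.py | findevendigits
-- ===== SOURCE A (Python) =====
-- from itertools import permutations
--
-- def findevendigits(digits):
--     arr = []
--     p = set(permutations(digits, 3))
--     for i in p:
--         if i[0] != 0 and i[-1] % 2 == 0:
--             temp = ''
--             for ii in i:
--                 temp += str(ii)
--             arr.append(int(temp))
--     arr.sort()
--     return arr
-- ===== SOURCE B (Python) =====
-- def findevendigits(digits):
--     # count multiplicities once, then enumerate distinct value triples (a, b, c)
--     # and keep those whose multiplicities fit in the available counts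
--     cnt = {}
--     for d in digits:
--         cnt[d] = cnt.get(d, 0) + 1
--     arr = []
--     for a in cnt:
--         if a == 0:
--             continue
--         for b in cnt:
--             for c in cnt:
--                 if c % 2 != 0:
--                     continue
--                 if (cnt[a] >= 1 + (a == b) + (a == c)
--                         and cnt[b] >= 1 + (b == a) + (b == c)
--                         and cnt[c] >= 1 + (c == a) + (c == b)):
--                     arr.append(int(str(a) + str(b) + str(c)))
--     arr.sort()
--     return arr
-- ===== Notes on version B (the rewrite author's own statement) =====
-- stated objective: alternative
-- what changed: B replaces A's enumeration of all ordered index triples (permutations(digits,3) deduplicated through a set) by a single counting pass over digits followed by a scan over distinct-value triples with a multiplicity-availability test.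
-- outside the precondition, e.g. on findevendigits([2, -4, 6]): A raises ValueError, B raises ValueError
import Mathlib
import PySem

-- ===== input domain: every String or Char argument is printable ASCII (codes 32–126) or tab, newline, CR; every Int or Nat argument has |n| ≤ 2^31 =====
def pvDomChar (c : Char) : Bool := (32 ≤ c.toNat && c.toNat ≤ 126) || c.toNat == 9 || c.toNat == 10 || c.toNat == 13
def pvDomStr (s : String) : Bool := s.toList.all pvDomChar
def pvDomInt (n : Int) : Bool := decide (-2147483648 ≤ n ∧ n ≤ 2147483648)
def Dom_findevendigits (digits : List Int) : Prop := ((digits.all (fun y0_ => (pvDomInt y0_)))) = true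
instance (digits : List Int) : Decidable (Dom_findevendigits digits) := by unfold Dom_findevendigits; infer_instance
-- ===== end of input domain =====

-- B replaces A's scan of all ordered index triples by one counting pass plus a scan of
-- distinct-value triples with a multiplicity-availability test; same return value on Pre_.

-- ===== PORT A =====
-- itertools.permutations(digits, 3) is PySem.List.permutations digits 3; int(temp) is
-- PySem.Int.ofChars? (none exactly where Python raises ValueError — those inputs are outside Pre_,
-- the loop leaves arr unchanged there); the string temp is built on List Char (PySem.Int.toChars).
def findevendigits (digits : List Int) : List Int :=
  let p : PySem.Set (List Int) := PySem.Set.ofList (PySem.List.permutations digits 3)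
  let arr : List Int :=
    p.foldl (fun arr i =>
      if PySem.List.pyGetD i 0 0 ≠ 0 ∧ PySem.Int.mod (PySem.List.pyGetD i (-1) 0) 2 = 0 then
        arr ++ (PySem.Int.ofChars? (i.foldl (fun temp ii => temp ++ PySem.Int.toChars ii) [])).toList
      else arr) []
  PySem.List.sorted arr (fun x => x) false

-- ===== PORT B =====
-- Source B's availability test: cnt[v] is getD v 0 (v is a key of cnt, so KeyError is impossible);
-- (a == b) as an int summand is 'if a = b then 1 else 0'.
def pvFeas (cnt : PySem.Dict Int Int) (a b c : Int) : Bool :=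
  decide (cnt.getD a 0 ≥ 1 + (if a = b then 1 else 0) + (if a = c then 1 else 0)) &&
  decide (cnt.getD b 0 ≥ 1 + (if b = a then 1 else 0) + (if b = c then 1 else 0)) &&
  decide (cnt.getD c 0 ≥ 1 + (if c = a then 1 else 0) + (if c = b then 1 else 0))

-- Source B: the counting loop 'cnt[d] = cnt.get(d, 0) + 1' is the Counter fold (PySem.Dict.counter_eq_foldl);
-- 'for a in cnt' iterates cnt.keys; 'continue' is the if-guard; int(str(a)+str(b)+str(c)) as in port A.
def findevendigits_alt (digits : List Int) : List Int :=
  let cnt : PySem.Dict Int Int := digits.foldl (fun d x => d.modify x 0 (· + 1)) PySem.Dict.empty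
  let ks := cnt.keys
  let arr : List Int :=
    ks.foldl (fun arr a =>
      if a = 0 then arr else
      ks.foldl (fun arr b =>
        ks.foldl (fun arr c =>
          if PySem.Int.mod c 2 ≠ 0 then arr else
          if pvFeas cnt a b c then
            arr ++ (PySem.Int.ofChars? (PySem.Int.toChars a ++ PySem.Int.toChars b ++ PySem.Int.toChars c)).toList
          else arr) arr) arr) []
  PySem.List.sorted arr (fun x => x) false

-- ===== PRECONDITION & SPEC =====
-- Pre_ excludes exactly the inputs on which A raises ValueError: those where some selectable value
-- triple (a, b, c) — three distinct positions, a nonzero, c even — has a negative b or c, so that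
-- int(str(a)+str(b)+str(c)) sees a '-' inside the digit string (e.g. int('2-46') on [2,-4,6]).
def Pre_findevendigits (digits : List Int) : Prop :=
  ∀ a ∈ digits, ∀ b ∈ digits, ∀ c ∈ digits,
    ([a, b, c].Subperm digits ∧ a ≠ 0 ∧ PySem.Int.mod c 2 = 0) → (0 ≤ b ∧ 0 ≤ c)
instance (digits : List Int) : Decidable (Pre_findevendigits digits) := by unfold Pre_findevendigits; infer_instance
def pvWitness_findevendigits : List Int := [1, 0, 2, 2, 9]

def Spec_findevendigits (digits : List Int) (out : List Int) : Prop := out = findevendigits_alt digits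
instance (digits : List Int) (out : List Int) : Decidable (Spec_findevendigits digits out) := by unfold Spec_findevendigits; infer_instance

-- ===== CLAIM (what is proved, stated in full; the proofs are below) =====
def Claim_equal_findevendigits : Prop := ∀ (digits : List Int), Dom_findevendigits digits → Pre_findevendigits digits → Spec_findevendigits digits (findevendigits digits)

-- ===== LEMMAS AND PROOFS =====

-- the per-tuple value both programs append (or skip, when int() would raise)
def pvParse (a b c : Int) : Option Int :=
  PySem.Int.ofChars? (PySem.Int.toChars a ++ PySem.Int.toChars b ++ PySem.Int.toChars c)

-- B's inner-loop body as an Option-valued function of the triple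
def pvGc (digits : List Int) (a b c : Int) : Option Int :=
  if PySem.Int.mod c 2 ≠ 0 then none
  else if pvFeas (PySem.Dict.counter digits) a b c then pvParse a b c else none

def pvG (digits : List Int) (t : Int × Int × Int) : Option Int :=
  if t.1 = 0 then none else pvGc digits t.1 t.2.1 t.2.2

def pvFeasP (digits : List Int) (t : Int × Int × Int) : Bool :=
  pvFeas (PySem.Dict.counter digits) t.1 t.2.1 t.2.2

def pvTriple (i : List Int) : Int × Int × Int :=
  (PySem.List.pyGetD i 0 0, PySem.List.pyGetD i 1 0, PySem.List.pyGetD i 2 0)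

-- 'if p(x): out.append(f(x)) (skipping when f(x) is none)' is filterMap
lemma foldl_append_filterMap {α β : Type} (f : α → Option β) (l : List α) (acc : List β) :
    l.foldl (fun acc x => acc ++ (f x).toList) acc = acc ++ l.filterMap f := by
  induction l generalizing acc with
  | nil => simp
  | cons x t ih =>
    simp only [List.foldl_cons, List.filterMap_cons]
    cases h : f x <;> simp [ih]

-- membership in PySem.List.permutations xs r is exactly 'length r sub-permutation'
lemma mem_permutations_iff {α : Type} [DecidableEq α] (r : ℕ) (xs p : List α) :
    p ∈ PySem.List.permutations xs r ↔ p.length = r ∧ p.Subperm xs := by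
  constructor
  · intro h
    obtain ⟨hl, rest, hperm⟩ := PySem.List.exists_perm_of_mem_permutations r xs p h
    exact ⟨hl, ((List.sublist_append_left p rest).subperm).trans hperm.subperm⟩
  · rintro ⟨hl, hsub⟩
    induction r generalizing xs p with
    | zero =>
      rw [List.length_eq_zero_iff] at hl
      subst hl
      simp [PySem.List.permutations_zero]
    | succ r ih =>
      match p, hl with
      | x :: q, hl =>
        have hx : x ∈ xs := hsub.subset (List.mem_cons_self)
        have hi : xs[xs.idxOf x]? = some x := List.getElem?_idxOf hx
        rw [PySem.List.permutations_succ]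
        refine List.mem_flatMap.mpr ⟨xs.idxOf x, List.mem_range.mpr (List.idxOf_lt_length_of_mem hx), ?_⟩
        rw [hi]
        refine List.mem_map.mpr ⟨q, ?_, rfl⟩
        refine ih _ _ (by simpa using hl) ?_
        have h1 : (x :: q).Subperm (x :: xs.eraseIdx (xs.idxOf x)) :=
          hsub.trans (PySem.List.perm_cons_eraseIdx xs hi).symm.subperm
        exact (List.subperm_cons x).mp h1

-- B's availability test is exactly sub-multiset containment
lemma count3 (x a b c : Int) : List.count x [a, b, c]
    = (if a = x then 1 else 0) + (if b = x then 1 else 0) + (if c = x then 1 else 0) := by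
  by_cases h1 : a = x <;> by_cases h2 : b = x <;> by_cases h3 : c = x <;>
    simp [h1, h2, h3]

lemma feas_iff_subperm (digits : List Int) (a b c : Int) :
    pvFeas (PySem.Dict.counter digits) a b c = true ↔ [a, b, c].Subperm digits := by
  rw [List.subperm_ext_iff]
  have hxs : (∀ x ∈ [a, b, c], List.count x [a, b, c] ≤ List.count x digits) ↔
      (List.count a [a, b, c] ≤ List.count a digits ∧
       List.count b [a, b, c] ≤ List.count b digits ∧
       List.count c [a, b, c] ≤ List.count c digits) := by
    constructor
    · intro h
      exact ⟨h a (by simp), h b (by simp), h c (by simp)⟩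
    · rintro ⟨h1, h2, h3⟩ x hx
      simp only [List.mem_cons, List.not_mem_nil, or_false] at hx
      rcases hx with rfl | rfl | rfl <;> assumption
  rw [hxs]
  simp only [pvFeas, PySem.Dict.getD_counter, Bool.and_eq_true, decide_eq_true_eq, ge_iff_le,
    count3]
  by_cases hab : a = b <;> by_cases hac : a = c <;> by_cases hbc : b = c <;>
    simp only [hab, hac, hbc] <;> simp_all [eq_comm] <;> first | omega | tauto

-- filtering out elements the mapping function kills anyway
lemma filterMap_filter_eq {α β : Type} (p : α → Bool) (f : α → Option β) (l : List α)
    (h : ∀ x, p x = false → f x = none) : (l.filter p).filterMap f = l.filterMap f := by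
  induction l with
  | nil => simp
  | cons x t ih =>
    by_cases hp : p x <;>
      simp [List.filterMap_cons, hp, ih]
    rw [h x (by simp [hp])]

-- A's loop body as a filterMap over the deduplicated permutation list
lemma arrA_eq (digits : List Int) :
    (PySem.Set.ofList (PySem.List.permutations digits 3)).foldl (fun arr i =>
      if PySem.List.pyGetD i 0 0 ≠ 0 ∧ PySem.Int.mod (PySem.List.pyGetD i (-1) 0) 2 = 0 then
        arr ++ (PySem.Int.ofChars? (i.foldl (fun temp ii => temp ++ PySem.Int.toChars ii) [])).toList
      else arr) []
    = ((PySem.Set.ofList (PySem.List.permutations digits 3)).map pvTriple).filterMap (pvG digits) := by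
  have hbody : (fun (arr : List Int) (i : List Int) =>
      if PySem.List.pyGetD i 0 0 ≠ 0 ∧ PySem.Int.mod (PySem.List.pyGetD i (-1) 0) 2 = 0 then
        arr ++ (PySem.Int.ofChars? (i.foldl (fun temp ii => temp ++ PySem.Int.toChars ii) [])).toList
      else arr)
      = (fun arr i =>
        arr ++ (if PySem.List.pyGetD i 0 0 ≠ 0 ∧ PySem.Int.mod (PySem.List.pyGetD i (-1) 0) 2 = 0 then
            PySem.Int.ofChars? (i.foldl (fun temp ii => temp ++ PySem.Int.toChars ii) []) else none).toList) := by
    funext arr i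
    split_ifs with h
    · rfl
    · simp
  rw [hbody]
  refine (foldl_append_filterMap _ _ _).trans ?_
  rw [List.nil_append, List.filterMap_map]
  refine List.filterMap_congr ?_
  intro i hi
  rw [PySem.Set.mem_ofList] at hi
  rw [mem_permutations_iff] at hi
  obtain ⟨hlen, hsub⟩ := hi
  obtain ⟨a, b, c, rfl⟩ := List.length_eq_three.mp hlen
  have hfeas : pvFeas (PySem.Dict.counter digits) a b c = true :=
    (feas_iff_subperm digits a b c).mpr hsub
  have h0 : PySem.List.pyGetD [a, b, c] 0 0 = a := by
    simp [PySem.List.pyGetD, PySem.List.pyGet?, PySem.List.pyIdx?]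
  have h1 : PySem.List.pyGetD [a, b, c] (-1) 0 = c := by
    simp [PySem.List.pyGetD, PySem.List.pyGet?, PySem.List.pyIdx?]
  have h2 : ([a, b, c].foldl (fun temp ii => temp ++ PySem.Int.toChars ii) [])
      = PySem.Int.toChars a ++ PySem.Int.toChars b ++ PySem.Int.toChars c := by
    simp [List.foldl]
  rw [h0, h1, h2]
  simp only [Function.comp_apply, pvTriple, h0]
  have h1' : PySem.List.pyGetD [a, b, c] 1 0 = b := by
    simp [PySem.List.pyGetD, PySem.List.pyGet?, PySem.List.pyIdx?]
  have h2' : PySem.List.pyGetD [a, b, c] 2 0 = c := by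
    simp [PySem.List.pyGetD, PySem.List.pyGet?, PySem.List.pyIdx?]
  rw [h1', h2']
  simp only [pvG, pvGc, pvParse]
  by_cases ha : a = 0
  · rw [if_pos ha, if_neg (by simp [ha])]
  · rw [if_neg ha]
    by_cases hc : PySem.Int.mod c 2 = 0
    · rw [if_pos ⟨ha, hc⟩, if_neg (not_not_intro hc), if_pos hfeas]
    · rw [if_neg (fun h => hc h.2), if_pos hc]

-- B's three nested loops as a filterMap over the filtered triple product
lemma arrB_eq (digits : List Int) :
    (PySem.Dict.counter digits).keys.foldl (fun arr a =>
      if a = 0 then arr else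
      (PySem.Dict.counter digits).keys.foldl (fun arr b =>
        (PySem.Dict.counter digits).keys.foldl (fun arr c =>
          if PySem.Int.mod c 2 ≠ 0 then arr else
          if pvFeas (PySem.Dict.counter digits) a b c then
            arr ++ (PySem.Int.ofChars? (PySem.Int.toChars a ++ PySem.Int.toChars b ++ PySem.Int.toChars c)).toList
          else arr) arr) arr) []
    = ((PySem.Set.ofList digits ×ˢ (PySem.Set.ofList digits ×ˢ PySem.Set.ofList digits)).filter
        (pvFeasP digits)).filterMap (pvG digits) := by
  have hks : (PySem.Dict.counter digits).keys = PySem.Set.ofList digits :=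
    PySem.Dict.keys_counter digits
  set ks := (PySem.Dict.counter digits).keys with hksdef
  have h1 : ∀ (a b : Int) (arr : List Int),
      ks.foldl (fun arr c =>
        if PySem.Int.mod c 2 ≠ 0 then arr else
        if pvFeas (PySem.Dict.counter digits) a b c then
          arr ++ (PySem.Int.ofChars? (PySem.Int.toChars a ++ PySem.Int.toChars b ++ PySem.Int.toChars c)).toList
        else arr) arr
      = arr ++ ks.filterMap (fun c => pvGc digits a b c) := by
    intro a b arr
    have hb : (fun (arr : List Int) (c : Int) =>
        if PySem.Int.mod c 2 ≠ 0 then arr else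
        if pvFeas (PySem.Dict.counter digits) a b c then
          arr ++ (PySem.Int.ofChars? (PySem.Int.toChars a ++ PySem.Int.toChars b ++ PySem.Int.toChars c)).toList
        else arr)
        = (fun arr c => arr ++ (pvGc digits a b c).toList) := by
      funext arr c
      simp only [pvGc, pvParse]
      split_ifs <;> simp
    rw [hb]
    exact foldl_append_filterMap (fun c => pvGc digits a b c) ks arr
  have h2 : ∀ (a : Int) (arr : List Int),
      ks.foldl (fun arr b =>
        ks.foldl (fun arr c =>
          if PySem.Int.mod c 2 ≠ 0 then arr else
          if pvFeas (PySem.Dict.counter digits) a b c then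
            arr ++ (PySem.Int.ofChars? (PySem.Int.toChars a ++ PySem.Int.toChars b ++ PySem.Int.toChars c)).toList
          else arr) arr) arr
      = arr ++ ks.flatMap (fun b => ks.filterMap (fun c => pvGc digits a b c)) := by
    intro a arr
    have hbm : (fun (arr : List Int) (b : Int) =>
        ks.foldl (fun arr c =>
          if PySem.Int.mod c 2 ≠ 0 then arr else
          if pvFeas (PySem.Dict.counter digits) a b c then
            arr ++ (PySem.Int.ofChars? (PySem.Int.toChars a ++ PySem.Int.toChars b ++ PySem.Int.toChars c)).toList
          else arr) arr)
        = (fun arr b => arr ++ ks.filterMap (fun c => pvGc digits a b c)) := by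
      funext arr b
      exact h1 a b arr
    rw [hbm, PySem.List.foldl_append_eq_flatMap]
  have h3 : (fun (arr : List Int) (a : Int) =>
      if a = 0 then arr else
      ks.foldl (fun arr b =>
        ks.foldl (fun arr c =>
          if PySem.Int.mod c 2 ≠ 0 then arr else
          if pvFeas (PySem.Dict.counter digits) a b c then
            arr ++ (PySem.Int.ofChars? (PySem.Int.toChars a ++ PySem.Int.toChars b ++ PySem.Int.toChars c)).toList
          else arr) arr) arr)
      = (fun arr a => arr ++ (if a = 0 then [] else
          ks.flatMap (fun b => ks.filterMap (fun c => pvGc digits a b c)))) := by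
    funext arr a
    by_cases ha : a = 0
    · simp [ha]
    · rw [if_neg ha, if_neg ha]
      exact h2 a arr
  rw [h3, PySem.List.foldl_append_eq_flatMap, List.nil_append]
  rw [filterMap_filter_eq (pvFeasP digits) (pvG digits) _ ?hnone]
  case hnone =>
    rintro ⟨a, b, c⟩ hf
    simp only [pvFeasP] at hf
    simp [pvG, pvGc, hf]
  rw [hks]
  simp only [SProd.sprod, List.product, List.filterMap_flatMap, List.filterMap_map]
  refine congrArg (fun F => List.flatMap F (PySem.Set.ofList digits)) (funext fun a => ?_)
  by_cases ha : a = 0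
  · simp [ha, pvG, Function.comp]
  · rw [if_neg ha]
    refine congrArg (fun F => List.flatMap F (PySem.Set.ofList digits)) (funext fun b => ?_)
    refine List.filterMap_congr fun c _ => ?_
    simp [pvG, Function.comp, ha]

-- the two triple lists agree as finite sets, and both are duplicate-free
lemma triples_perm (digits : List Int) :
    ((PySem.Set.ofList (PySem.List.permutations digits 3)).map pvTriple).Perm
      ((PySem.Set.ofList digits ×ˢ (PySem.Set.ofList digits ×ˢ PySem.Set.ofList digits)).filter
        (pvFeasP digits)) := by
  have hnodL : ((PySem.Set.ofList (PySem.List.permutations digits 3)).map pvTriple).Nodup := by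
    refine List.Nodup.map_on ?_ (PySem.Set.nodup_ofList _)
    intro i hi j hj hij
    rw [PySem.Set.mem_ofList, mem_permutations_iff] at hi hj
    obtain ⟨a, b, c, rfl⟩ := List.length_eq_three.mp hi.1
    obtain ⟨a', b', c', rfl⟩ := List.length_eq_three.mp hj.1
    simp [pvTriple, PySem.List.pyGetD, PySem.List.pyGet?, PySem.List.pyIdx?] at hij
    simp [hij]
  have hnodR : ((PySem.Set.ofList digits ×ˢ (PySem.Set.ofList digits ×ˢ PySem.Set.ofList digits)).filter
      (pvFeasP digits)).Nodup :=
    List.Nodup.filter _ (List.Nodup.product (PySem.Set.nodup_ofList _)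
      (List.Nodup.product (PySem.Set.nodup_ofList _) (PySem.Set.nodup_ofList _)))
  have hmem : ∀ t : Int × Int × Int,
      (t ∈ (PySem.Set.ofList (PySem.List.permutations digits 3)).map pvTriple ↔
       t ∈ (PySem.Set.ofList digits ×ˢ (PySem.Set.ofList digits ×ˢ PySem.Set.ofList digits)).filter
        (pvFeasP digits)) := by
    rintro ⟨a, b, c⟩
    rw [List.mem_filter, List.mem_map]
    have hL : (∃ i ∈ PySem.Set.ofList (PySem.List.permutations digits 3),
        pvTriple i = (a, b, c)) ↔ [a, b, c].Subperm digits := by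
      constructor
      · rintro ⟨i, hi, hti⟩
        rw [PySem.Set.mem_ofList, mem_permutations_iff] at hi
        obtain ⟨x, y, z, rfl⟩ := List.length_eq_three.mp hi.1
        simp [pvTriple, PySem.List.pyGetD, PySem.List.pyGet?, PySem.List.pyIdx?] at hti
        obtain ⟨rfl, rfl, rfl⟩ := hti
        exact hi.2
      · intro hsub
        refine ⟨[a, b, c], ?_, ?_⟩
        · rw [PySem.Set.mem_ofList, mem_permutations_iff]
          exact ⟨rfl, hsub⟩
        · simp [pvTriple, PySem.List.pyGetD, PySem.List.pyGet?, PySem.List.pyIdx?]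
    rw [hL]
    constructor
    · intro hsub
      have hfe := (feas_iff_subperm digits a b c).mpr hsub
      have hmm : ∀ x ∈ [a, b, c], x ∈ digits := fun x hx => hsub.subset hx
      refine ⟨?_, ?_⟩
      · have h1 := hmm a (by simp)
        have h2 := hmm b (by simp)
        have h3 := hmm c (by simp)
        exact List.pair_mem_product.mpr ⟨(PySem.Set.mem_ofList digits a).mpr h1,
          List.pair_mem_product.mpr ⟨(PySem.Set.mem_ofList digits b).mpr h2,
            (PySem.Set.mem_ofList digits c).mpr h3⟩⟩
      · simpa [pvFeasP] using hfe
    · rintro ⟨_, hfe⟩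
      exact (feas_iff_subperm digits a b c).mp (by simpa [pvFeasP] using hfe)
  exact List.Subperm.antisymm
    (hnodL.subperm fun t ht => (hmem t).mp ht)
    (hnodR.subperm fun t ht => (hmem t).mpr ht)

-- ===== VERDICT (by name: the statement is the Claim_ definition above) =====
theorem findevendigits_spec : Claim_equal_findevendigits := by
  intro digits _hdom _hpre
  unfold Spec_findevendigits findevendigits findevendigits_alt
  simp only [← PySem.Dict.counter_eq_foldl]
  refine (PySem.List.sorted_id_eq_sorted_id_iff_perm _ _).mpr ?_
  exact (List.Perm.of_eq (arrA_eq digits)).trans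
    (((triples_perm digits).filterMap (pvG digits)).trans (List.Perm.of_eq (arrB_eq digits).symm))
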